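-- pv_equiv track=rewrite | github.com/python348/news-digest | main.py | limit_per_source
-- ===== SOURCE A (Python) =====
-- from collections import Counter
--
-- MAX_PER_SOURCE = 2
--
-- def limit_per_source(articles: list[dict]) -> list[dict]:
--     """同一ソースからの記事数を制限する。"""
--     source_count: Counter = Counter()
--     result = []
--     for art in articles:
--         source = art["source"]
--         if source_count[source] < MAX_PER_SOURCE:
--             result.append(art)
--             source_count[source] += 1
--     return result
-- ===== SOURCE B (Python) =====
-- MAX_PER_SOURCE = 2
--
-- def limit_per_source(articles: list[dict]) -> list[dict]:
--     """同一ソースからの記事数を制限する。"""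
--     return [art for i, art in enumerate(articles)
--             if sum(1 for prev in articles[:i]
--                    if prev["source"] == art["source"]) < MAX_PER_SOURCE]
-- ===== Notes on version B (the rewrite author's own statement) =====
-- stated objective: alternative
-- what changed: Replaces the running Counter + accumulator loop by a stateless list comprehension that keeps an article iff fewer than MAX_PER_SOURCE earlier articles (kept or not - they coincide for the first MAX) share its source.
import Mathlib
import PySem

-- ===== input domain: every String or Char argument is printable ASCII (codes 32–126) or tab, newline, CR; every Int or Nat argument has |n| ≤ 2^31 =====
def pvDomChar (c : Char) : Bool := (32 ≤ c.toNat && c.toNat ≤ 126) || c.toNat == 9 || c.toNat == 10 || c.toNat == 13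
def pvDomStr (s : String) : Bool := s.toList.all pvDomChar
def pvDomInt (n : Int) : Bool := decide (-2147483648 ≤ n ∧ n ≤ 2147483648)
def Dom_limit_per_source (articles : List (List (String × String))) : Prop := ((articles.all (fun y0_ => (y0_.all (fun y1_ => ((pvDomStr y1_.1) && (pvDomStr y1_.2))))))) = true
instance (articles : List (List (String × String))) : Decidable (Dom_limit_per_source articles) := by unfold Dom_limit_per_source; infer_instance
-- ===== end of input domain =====

-- B replaces A's running Counter + accumulator with a stateless prefix-recount filter; return values proved equal (objective: alternative).

-- art["source"] (first-match dict lookup); total form, Pre_ guarantees the key is present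
def pvSrc (art : List (String × String)) : String :=
  ((PySem.Dict.mk art).get? "source").getD ""

-- ===== PORT A =====
-- the body of A's for-loop: state = (source_count, result)
def pvStepA (st : PySem.Dict String Int × List (List (String × String)))
    (art : List (String × String)) : PySem.Dict String Int × List (List (String × String)) :=
  let source := pvSrc art
  if st.1.getD source 0 < 2 then (st.1.insert source (st.1.getD source 0 + 1), st.2 ++ [art])
  else st

def limit_per_source (articles : List (List (String × String))) : List (List (String × String)) :=
  (articles.foldl pvStepA (PySem.Dict.empty, [])).2

-- ===== PORT B =====
def limit_per_source_alt (articles : List (List (String × String))) : List (List (String × String)) :=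
  (PySem.List.enumerate articles).filterMap (fun p =>
    if (PySem.List.slice articles none (some p.1)).countP
        (fun prev => pvSrc prev == pvSrc p.2) < 2
    then some p.2 else none)

-- ===== PRECONDITION & SPEC =====
-- Pre_ excludes articles lacking a "source" key: there A (and B) raises KeyError.
def Pre_limit_per_source (articles : List (List (String × String))) : Prop :=
  (articles.all (fun art => (PySem.Dict.mk art).contains "source")) = true
instance (articles : List (List (String × String))) : Decidable (Pre_limit_per_source articles) := by
  unfold Pre_limit_per_source; infer_instance

def pvWitness_limit_per_source : (List (List (String × String))) :=
  [[("source", "a"), ("title", "x")], [("source", "a")], [("source", "b")], [("source", "a")]]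

def Spec_limit_per_source (articles : List (List (String × String))) (out : List (List (String × String))) : Prop := out = limit_per_source_alt articles
instance (articles : List (List (String × String))) (out : List (List (String × String))) : Decidable (Spec_limit_per_source articles out) := by unfold Spec_limit_per_source; infer_instance

-- ===== CLAIM (what is proved, stated in full; the proofs are below) =====
def Claim_equal_limit_per_source : Prop := ∀ (articles : List (List (String × String))), Dom_limit_per_source articles → Pre_limit_per_source articles → Spec_limit_per_source articles (limit_per_source articles)

-- ===== LEMMAS AND PROOFS =====

-- reference recursion: keep an article iff < 2 articles of its source occur in the prefix
def pvRef (pre rest : List (List (String × String))) : List (List (String × String)) :=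
  match rest with
  | [] => []
  | a :: rest =>
    if pre.countP (fun x => pvSrc x == pvSrc a) < 2
    then a :: pvRef (pre ++ [a]) rest
    else pvRef (pre ++ [a]) rest

theorem foldA_eq (rest : List (List (String × String))) :
    ∀ (pre : List (List (String × String))) (d : PySem.Dict String Int)
      (res : List (List (String × String))),
      (∀ s : String, d.getD s 0 = min ((pre.countP (fun x => pvSrc x == s) : Int)) 2) →
      (rest.foldl pvStepA (d, res)).2 = res ++ pvRef pre rest := by
  induction rest with
  | nil => intro pre d res _; simp [pvRef]
  | cons a rest ih =>
    intro pre d res hinv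
    have hd := hinv (pvSrc a)
    by_cases hk : pre.countP (fun x => pvSrc x == pvSrc a) < 2
    · have hlt : d.getD (pvSrc a) 0 < 2 := by omega
      have hrec := ih (pre ++ [a]) (d.insert (pvSrc a) (d.getD (pvSrc a) 0 + 1)) (res ++ [a]) ?_
      · simp only [List.foldl_cons, pvStepA, hlt, if_pos]
        rw [hrec, pvRef, if_pos hk]
        simp
      · intro s
        rw [PySem.Dict.getD_insert]
        by_cases hs : s = pvSrc a
        · subst hs
          simp only [hd, List.countP_append, List.countP_cons,
            List.countP_nil, beq_self_eq_true, if_true]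
          push_cast
          omega
        · rw [if_neg hs, hinv s]
          have : (pre ++ [a]).countP (fun x => pvSrc x == s) = pre.countP (fun x => pvSrc x == s) := by
            simp only [List.countP_append, List.countP_cons, List.countP_nil]
            have : (pvSrc a == s) = false := by
              simp; exact fun h => hs h.symm
            simp [this]
          rw [this]
    · have hge : ¬ d.getD (pvSrc a) 0 < 2 := by omega
      have hrec := ih (pre ++ [a]) d res ?_
      · simp only [List.foldl_cons, pvStepA, if_neg hge]
        rw [hrec, pvRef, if_neg hk]
      · intro s
        rw [hinv s]
        by_cases hs : s = pvSrc a
        · subst hs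
          simp only [List.countP_append, List.countP_cons, List.countP_nil,
            beq_self_eq_true, if_pos]
          push_cast
          omega
        · have : (pvSrc a == s) = false := by
            simp; exact fun h => hs h.symm
          simp only [List.countP_append, List.countP_cons, List.countP_nil, this]
          push_cast
          omega

theorem altB_eq (xs : List (List (String × String))) :
    ∀ (pre articles : List (List (String × String))),
      articles = pre ++ xs →
      (PySem.List.enumerate xs (pre.length : Int)).filterMap (fun p =>
        if (PySem.List.slice articles none (some p.1)).countP
            (fun prev => pvSrc prev == pvSrc p.2) < 2
        then some p.2 else none) = pvRef pre xs := by
  induction xs with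
  | nil => intro pre articles _; simp [PySem.List.enumerate_nil, pvRef]
  | cons a xs ih =>
    intro pre articles harts
    rw [PySem.List.enumerate_cons]
    have hslice : PySem.List.slice articles none (some ((pre.length : Nat) : Int)) = pre := by
      rw [PySem.List.slice_to_natCast, harts, List.take_append_of_le_length (le_refl _),
        List.take_length]
    have hstart : ((pre.length : Int) + 1) = (((pre ++ [a]).length : Nat) : Int) := by
      simp
    have hrec := ih (pre ++ [a]) articles (by simp [harts])
    rw [List.filterMap_cons]
    simp only [hslice]
    by_cases hk : pre.countP (fun prev => pvSrc prev == pvSrc a) < 2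
    · rw [if_pos hk, pvRef, if_pos hk, hstart, hrec]
    · rw [if_neg hk, pvRef, if_neg hk, hstart, hrec]

-- ===== VERDICT (by name: the statement is the Claim_ definition above) =====
theorem limit_per_source_spec : Claim_equal_limit_per_source := by
  intro articles _ _
  unfold Spec_limit_per_source limit_per_source limit_per_source_alt
  rw [foldA_eq articles [] PySem.Dict.empty [] (by intro s; simp [PySem.Dict.getD_empty]),
    List.nil_append]
  have := altB_eq articles [] articles (by simp)
  simpa [PySem.List.enumerate] using this.symm
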